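-- pv_equiv track=rewrite | github.com/felipeAmaral7/exercicios-AED2 | lista04-ordenacao_n2/ex03.py | semMenor
-- ===== SOURCE A (Python) =====
-- def semMenor(tupla):
-- 	i = 1
-- 	menor = tupla[1]
-- 	soma = 0
-- 	while i < len(tupla):
-- 		if tupla[i] < menor:
-- 			menor = tupla[i]
-- 		soma += tupla[i]
-- 		i += 1
-- 	return soma - menor
-- ===== SOURCE B (Python) =====
-- def semMenor(tupla):
--     resto = sorted(tupla[1:])
--     return sum(resto[1:])
-- ===== Notes on version B (the rewrite author's own statement) =====
-- stated objective: alternative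
-- what changed: B sorts tupla[1:] and sums everything after the first (smallest) sorted element, instead of A's fused index loop that tracks a running sum and a running minimum.
import Mathlib
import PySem

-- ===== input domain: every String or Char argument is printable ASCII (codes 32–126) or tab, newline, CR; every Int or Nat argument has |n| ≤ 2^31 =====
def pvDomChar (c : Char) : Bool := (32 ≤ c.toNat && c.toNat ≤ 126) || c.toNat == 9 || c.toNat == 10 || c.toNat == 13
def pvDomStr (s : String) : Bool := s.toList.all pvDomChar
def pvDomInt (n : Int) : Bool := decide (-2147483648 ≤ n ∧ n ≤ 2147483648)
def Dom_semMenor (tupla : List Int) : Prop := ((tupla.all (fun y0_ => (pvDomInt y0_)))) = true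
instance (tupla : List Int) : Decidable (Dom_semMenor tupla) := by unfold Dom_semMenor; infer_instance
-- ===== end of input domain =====

-- B sorts tupla[1:] and sums everything after the first sorted element; return-value equivalence on tuples of length ≥ 2.

-- ===== PORT A =====
-- the 'while i < len(tupla)' loop; tupla[i] via pyGet? (getD 0 is never hit: i stays in range inside the loop)
def semMenorLoop (tupla : List Int) (i menor soma : Int) : Int :=
  if _h : i < tupla.length then
    let t := (PySem.List.pyGet? tupla i).getD 0
    semMenorLoop tupla (i + 1) (if t < menor then t else menor) (soma + t)
  else
    soma - menor
termination_by (tupla.length - i).toNat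
decreasing_by omega

def semMenor (tupla : List Int) : Int :=
  -- menor = tupla[1]  (IndexError when len < 2 → outside Pre_; getD 0 stands for the raise)
  semMenorLoop tupla 1 ((PySem.List.pyGet? tupla 1).getD 0) 0

-- ===== PORT B =====
def semMenor_alt (tupla : List Int) : Int :=
  let resto := PySem.List.sorted (PySem.List.slice tupla (some 1) none) (fun x => x)  -- sorted(tupla[1:])
  (PySem.List.slice resto (some 1) none).sum                                          -- sum(resto[1:])

-- ===== PRECONDITION & SPEC =====
-- Pre_ excludes exactly the inputs where A raises IndexError (tupla[1] with fewer than 2 elements).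
def Pre_semMenor (tupla : List Int) : Prop := 2 ≤ tupla.length
instance (tupla : List Int) : Decidable (Pre_semMenor tupla) := by unfold Pre_semMenor; infer_instance

def pvWitness_semMenor : List Int := [3, 1, 2]

def Spec_semMenor (tupla : List Int) (out : Int) : Prop := out = semMenor_alt tupla
instance (tupla : List Int) (out : Int) : Decidable (Spec_semMenor tupla out) := by unfold Spec_semMenor; infer_instance

-- ===== CLAIM (what is proved, stated in full; the proofs are below) =====
def Claim_equal_semMenor : Prop := ∀ (tupla : List Int), Dom_semMenor tupla → Pre_semMenor tupla → Spec_semMenor tupla (semMenor tupla)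

-- ===== LEMMAS AND PROOFS =====

-- loop invariant: from index i (with l the remaining suffix), the loop returns soma + sum l - foldl min menor l
lemma semMenorLoop_eq (l : List Int) : ∀ (tupla : List Int) (i menor soma : Int),
    0 ≤ i → tupla.drop i.toNat = l →
    semMenorLoop tupla i menor soma = soma + l.sum - l.foldl min menor := by
  induction l with
  | nil =>
      intro tupla i menor soma hi hdrop
      have hlen : tupla.length ≤ i.toNat := by
        by_contra h
        have := List.drop_eq_nil_iff.mp hdrop
        omega
      rw [semMenorLoop]
      simp only [List.sum_nil, List.foldl_nil]
      have : ¬ i < (tupla.length : Int) := by omega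
      simp [this]
  | cons a l ih =>
      intro tupla i menor soma hi hdrop
      have hlt : i.toNat < tupla.length := by
        by_contra h
        rw [List.drop_eq_nil_iff.mpr (by omega)] at hdrop
        simp at hdrop
      have hget : tupla[i.toNat] = a := by
        have h0 : 0 < (tupla.drop i.toNat).length := by rw [hdrop]; simp
        have := List.getElem_drop (xs := tupla) (i := i.toNat) (j := 0) (h := h0)
        simpa [hdrop] using this.symm
      rw [semMenorLoop]
      have hlti : i < (tupla.length : Int) := by omega
      simp only [hlti, dif_pos]
      rw [PySem.List.pyGet?_eq_some_getElem tupla hi (by exact_mod_cast hlti)]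
      simp only [Option.getD_some, hget]
      rw [ih tupla (i + 1) _ _ (by omega)
        (by rw [show (i + 1).toNat = i.toNat + 1 by omega, ← List.drop_drop, hdrop]; simp)]
      have hmin : (if a < menor then a else menor) = min menor a := by
        rw [min_def]; split_ifs <;> omega
      rw [hmin]
      simp [List.foldl_cons]
      ring

-- foldl min x xs is a member of x::xs and a lower bound of it
lemma foldl_min_mem_le (xs : List Int) : ∀ (x : Int),
    xs.foldl min x ∈ x :: xs ∧ ∀ y ∈ x :: xs, xs.foldl min x ≤ y := by
  induction xs with
  | nil => intro x; simp
  | cons a xs ih =>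
      intro x
      obtain ⟨hmem, hle⟩ := ih (min x a)
      constructor
      · simp only [List.foldl_cons]
        rcases List.mem_cons.mp hmem with h | h
        · rcases min_cases x a with ⟨he, _⟩ | ⟨he, _⟩ <;> rw [h, he] <;> simp
        · simp [h]
      · intro y hy
        simp only [List.foldl_cons]
        have hfm := hle (min x a) (by simp)
        rcases List.mem_cons.mp hy with h | h
        · subst h; exact le_trans hfm (min_le_left _ _)
        · rcases List.mem_cons.mp h with h' | h'
          · subst h'; exact le_trans hfm (min_le_right _ _)
          · exact hle y (by simp [h'])

-- ===== VERDICT (by name: the statement is the Claim_ definition above) =====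
theorem semMenor_spec : Claim_equal_semMenor := by
  intro tupla _ hpre
  unfold Pre_semMenor at hpre
  match tupla, hpre with
  | t0 :: t1 :: rest, _ =>
    show semMenor (t0 :: t1 :: rest) = semMenor_alt (t0 :: t1 :: rest)
    unfold semMenor semMenor_alt
    rw [PySem.List.pyGet?_eq_some_getElem (t0 :: t1 :: rest) (i := 1) (by norm_num) (by simp)]
    simp only [Option.getD_some]
    rw [semMenorLoop_eq (t1 :: rest) _ 1 _ _ (by norm_num) (by simp)]
    simp only [PySem.List.slice_from_one, List.tail_cons]
    -- sorted (t1 :: rest) is nonempty: m :: t with m the minimum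
    obtain ⟨m, t, hs⟩ : ∃ m t, PySem.List.sorted (t1 :: rest) (fun x => x) = m :: t := by
      rcases h : PySem.List.sorted (t1 :: rest) (fun x : Int => x) with _ | ⟨m, t⟩
      · have hp := PySem.List.sorted_perm (t1 :: rest) (fun x : Int => x) false
        rw [h] at hp
        simpa using hp.length_eq
      · exact ⟨m, t, rfl⟩
    rw [hs, List.tail_cons]
    have hperm : (m :: t).Perm (t1 :: rest) := hs ▸ PySem.List.sorted_perm _ _ _
    have hsum : m + t.sum = t1 + rest.sum := by simpa using hperm.sum_eq
    obtain ⟨hfmem, hfle⟩ := foldl_min_mem_le rest t1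
    have hmle : ∀ y ∈ t1 :: rest, m ≤ y := fun y hy => by
      simpa using PySem.List.key_head_sorted_le (t1 :: rest) (fun x : Int => x) hs y hy
    have h1 : m ≤ rest.foldl min t1 := hmle _ hfmem
    have h2 : rest.foldl min t1 ≤ m := hfle _ (hperm.mem_iff.mp (by simp))
    have : rest.foldl min t1 = m := le_antisymm h2 h1
    simp only [show (1 : Int).toNat = 1 from rfl, List.getElem_cons_succ,
      List.getElem_cons_zero, List.foldl_cons, List.sum_cons, min_self]
    omega
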